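-- pv_equiv track=rewrite | github.com/GaganovAlexander/Hometasks | robot_the_escaper/slow_variation.py | slow_var
-- ===== SOURCE A (Python) =====
-- def slow_var(map__):
--     map_ = map__.copy()
--     run = True
--     while run:
--         run = False
--         for i in range(len(map_)):
--             for j in range(len(map_[0])):
--                 cnt = 0
--                 path = False
--                 for k in ((i-1, j), (i+1, j), (i, j-1), (i, j+1)):
--                     if 0 <= k[0] < len(map_) and 0 <= k[1] < len(map_[0]):
--                         if map_[k[0]][k[1]] == 0:
--                             cnt += 1
--                         if map_[k[0]][k[1]] in (2, 3):
--                             path = True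
--                 if cnt <= 1:
--                     if map_[i][j] not in [1, 2, 3] and path:
--                         map_[i][j] = 3
--                         run = True
--     return map_
-- ===== SOURCE B (Python) =====
-- def slow_var(map__):
--     map_ = map__.copy()
--     n = len(map_)
--     m = len(map_[0]) if map_ else 0
--     stack = [(i, j) for i in range(n) for j in range(m)]
--     while stack:
--         i, j = stack.pop()
--         if map_[i][j] in (1, 2, 3):
--             continue
--         cnt = 0
--         path = False
--         for a, b in ((i - 1, j), (i + 1, j), (i, j - 1), (i, j + 1)):
--             if 0 <= a < n and 0 <= b < m:
--                 w = map_[a][b]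
--                 if w == 0:
--                     cnt += 1
--                 if w in (2, 3):
--                     path = True
--         if cnt <= 1 and path:
--             map_[i][j] = 3
--             for a, b in ((i - 1, j), (i + 1, j), (i, j - 1), (i, j + 1)):
--                 if 0 <= a < n and 0 <= b < m:
--                     stack.append((a, b))
--     return map_
-- ===== Notes on version B (the rewrite author's own statement) =====
-- stated objective: faster
-- what changed: Replaced repeated full-grid sweeps to a fixpoint by a worklist (stack) algorithm that re-examines only the neighbors of each converted cell, so each cell is processed O(1) times instead of once per sweep.
import Mathlib
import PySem

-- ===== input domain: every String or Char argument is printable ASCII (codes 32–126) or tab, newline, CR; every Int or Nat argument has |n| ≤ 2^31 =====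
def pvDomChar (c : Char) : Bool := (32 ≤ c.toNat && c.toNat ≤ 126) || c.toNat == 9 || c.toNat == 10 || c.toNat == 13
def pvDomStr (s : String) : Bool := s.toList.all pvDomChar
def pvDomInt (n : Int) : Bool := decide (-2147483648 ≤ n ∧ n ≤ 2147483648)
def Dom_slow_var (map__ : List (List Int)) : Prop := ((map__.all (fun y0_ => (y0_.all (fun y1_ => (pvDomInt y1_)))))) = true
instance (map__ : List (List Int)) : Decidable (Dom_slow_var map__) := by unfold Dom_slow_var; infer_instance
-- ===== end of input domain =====

-- B replaces A's repeated full-grid sweeps by a worklist stack that revisits only neighbors of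
-- converted cells (objective: faster). Both A and B mutate the rows of the argument in place
-- (A copies only the outer list); the equivalence proved here is about the RETURN value.

-- ===== PORT A =====
-- shared helpers: cell read map_[i][j], cell write map_[i][j] = v, and the neighbor scan
-- (the inner `for k in ((i-1,j),...)` loop is textually identical in A and B, hence shared)
def gval (g : List (List Int)) (i j : Nat) : Int := (g.getD i []).getD j 0
def gset (g : List (List Int)) (i j : Nat) (v : Int) : List (List Int) :=
  g.set i ((g.getD i []).set j v)
def nbrList (i j : Nat) : List (Int × Int) :=
  [((i:Int) - 1, (j:Int)), ((i:Int) + 1, (j:Int)), ((i:Int), (j:Int) - 1), ((i:Int), (j:Int) + 1)]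
def scanStep (g : List (List Int)) (acc : Nat × Bool) (k : Int × Int) : Nat × Bool :=
  if 0 ≤ k.1 ∧ k.1 < (g.length : Int) ∧ 0 ≤ k.2 ∧ k.2 < (((g.getD 0 []).length : Int)) then
    ((if gval g k.1.toNat k.2.toNat = 0 then acc.1 + 1 else acc.1),
     (acc.2 || decide (gval g k.1.toNat k.2.toNat = 2 ∨ gval g k.1.toNat k.2.toNat = 3)))
  else acc
def scanNbrs (g : List (List Int)) (i j : Nat) : Nat × Bool :=
  (nbrList i j).foldl (scanStep g) (0, false)
-- row-major list of all cell coordinates (A's nested `for i ... for j ...`)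
def cells (n m : Nat) : List (Nat × Nat) :=
  (List.range n).flatMap (fun i => (List.range m).map (fun j => (i, j)))
-- body of A's double loop for one cell (i, j), state = (map_, run)
def passCell (s : List (List Int) × Bool) (ij : Nat × Nat) : List (List Int) × Bool :=
  let g := s.1
  let cp := scanNbrs g ij.1 ij.2
  if cp.1 ≤ 1 then
    if ¬(gval g ij.1 ij.2 = 1 ∨ gval g ij.1 ij.2 = 2 ∨ gval g ij.1 ij.2 = 3) ∧ cp.2 = true then
      (gset g ij.1 ij.2 3, true)
    else s
  else s
-- A's `while run` loop; fuel n*m+1 is a totality guard only: each repeated pass converts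
-- at least one cell to 3, so at most n*m passes can set run=True
def loopA : Nat → List (List Int) → List (List Int)
  | 0, g => g
  | fuel + 1, g =>
    let r := (cells g.length (g.getD 0 []).length).foldl passCell (g, false)
    if r.2 then loopA fuel r.1 else r.1
def slow_var (map__ : List (List Int)) : List (List Int) :=
  loopA (map__.length * (map__.getD 0 []).length + 1) map__

-- ===== PORT B =====
-- in-range neighbors of (i,j) in Python's push order
def pushNbrs (n m i j : Nat) : List (Nat × Nat) :=
  (nbrList i j).filterMap (fun k =>
    if 0 ≤ k.1 ∧ k.1 < (n : Int) ∧ 0 ≤ k.2 ∧ k.2 < (m : Int) then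
      some (k.1.toNat, k.2.toNat) else none)
-- B's `while stack` loop; list head = top of stack (Python pops from the end, so pushed
-- neighbors are prepended in reverse); fuel 6*n*m+1 is a totality guard only
def loopB : Nat → List (List Int) → List (Nat × Nat) → List (List Int)
  | 0, g, _ => g
  | _ + 1, g, [] => g
  | fuel + 1, g, ij :: rest =>
    if gval g ij.1 ij.2 = 1 ∨ gval g ij.1 ij.2 = 2 ∨ gval g ij.1 ij.2 = 3 then
      loopB fuel g rest
    else
      let cp := scanNbrs g ij.1 ij.2
      if cp.1 ≤ 1 ∧ cp.2 = true then
        loopB fuel (gset g ij.1 ij.2 3)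
          ((pushNbrs g.length (g.getD 0 []).length ij.1 ij.2).reverse ++ rest)
      else loopB fuel g rest
-- Source B's `m = len(map_[0]) if map_ else 0` is exactly `(map__.getD 0 []).length`
def slow_var_alt (map__ : List (List Int)) : List (List Int) :=
  let n := map__.length
  let m := (map__.getD 0 []).length
  loopB (6 * (n * m) + 1) map__ ((cells n m).reverse)

-- ===== PRECONDITION & SPEC =====
-- Pre_ excludes only the grids containing a row shorter than row 0, on which Python A raises
-- IndexError (a neighbor read map_[k0][k1] goes past the end of the shorter row).
def Pre_slow_var (map__ : List (List Int)) : Prop :=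
  ∀ row ∈ map__, (map__.getD 0 []).length ≤ row.length
instance (map__ : List (List Int)) : Decidable (Pre_slow_var map__) := by
  unfold Pre_slow_var; infer_instance
def pvWitness_slow_var : List (List Int) := [[0, 2], [0, 0]]
def Spec_slow_var (map__ : List (List Int)) (out : List (List Int)) : Prop :=
  out = slow_var_alt map__
instance (map__ : List (List Int)) (out : List (List Int)) : Decidable (Spec_slow_var map__ out) := by
  unfold Spec_slow_var; infer_instance

-- ===== CLAIM (what is proved, stated in full; the proofs are below) =====
def Claim_equal_slow_var : Prop := ∀ (map__ : List (List Int)), Dom_slow_var map__ →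
  Pre_slow_var map__ → Spec_slow_var map__ (slow_var map__)

-- ===== LEMMAS AND PROOFS =====

-- abstract model: one conversion step, reachability, final (converged) states
abbrev convCond (g : List (List Int)) (i j : Nat) : Prop :=
  (scanNbrs g i j).1 ≤ 1 ∧ ¬(gval g i j = 1 ∨ gval g i j = 2 ∨ gval g i j = 3) ∧
    (scanNbrs g i j).2 = true
def Conv (g : List (List Int)) (i j : Nat) : Prop :=
  i < g.length ∧ j < (g.getD 0 []).length ∧ convCond g i j
def Step (g g' : List (List Int)) : Prop := ∃ i j, Conv g i j ∧ g' = gset g i j 3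
def Reach (g g' : List (List Int)) : Prop := Relation.ReflTransGen Step g g'
def Final (g : List (List Int)) : Prop := ∀ i j, ¬ Conv g i j
def GoodShape (g : List (List Int)) : Prop :=
  ∀ i, i < g.length → (g.getD 0 []).length ≤ (g.getD i []).length
def Mnot3 (g : List (List Int)) : Nat :=
  (cells g.length (g.getD 0 []).length).countP (fun ij => gval g ij.1 ij.2 != 3)

theorem length_gset (g : List (List Int)) (i j : Nat) (v : Int) :
    (gset g i j v).length = g.length := by simp [gset]


theorem getD_gset_ne (g : List (List Int)) (i j : Nat) (v : Int) (a : Nat) (h : a ≠ i) :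
    (gset g i j v).getD a [] = g.getD a [] := by
  simp [gset, List.getD_eq_getElem?_getD, List.getElem?_set_ne (Ne.symm h)]

theorem getD_gset_self (g : List (List Int)) (i j : Nat) (v : Int) (hi : i < g.length) :
    (gset g i j v).getD i [] = (g.getD i []).set j v := by
  simp [gset, List.getD_eq_getElem?_getD, hi]

theorem gset_of_length_le (g : List (List Int)) (i j : Nat) (v : Int)
    (h : g.length ≤ i) : gset g i j v = g := by
  simp [gset, List.set_eq_of_length_le h]

theorem rowlen_gset (g : List (List Int)) (i j : Nat) (v : Int) (a : Nat) :
    ((gset g i j v).getD a []).length = (g.getD a []).length := by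
  by_cases h : a = i
  · subst h
    by_cases hi : a < g.length
    · rw [getD_gset_self g a j v hi]; simp
    · rw [gset_of_length_le g a j v (by omega)]
  · rw [getD_gset_ne g i j v a h]

theorem m_gset (g : List (List Int)) (i j : Nat) (v : Int) :
    ((gset g i j v).getD 0 []).length = (g.getD 0 []).length := rowlen_gset g i j v 0

theorem val_gset_ne (g : List (List Int)) (i j : Nat) (v : Int) (a b : Nat)
    (h : ¬(a = i ∧ b = j)) : gval (gset g i j v) a b = gval g a b := by
  by_cases ha : a = i
  · subst ha
    have hb : b ≠ j := fun hb => h ⟨rfl, hb⟩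
    by_cases hi : a < g.length
    · unfold gval
      rw [getD_gset_self g a j v hi]
      simp [List.getD_eq_getElem?_getD, List.getElem?_set_ne (Ne.symm hb)]
    · rw [gset_of_length_le g a j v (by omega)]
  · unfold gval
    rw [getD_gset_ne g i j v a ha]

theorem val_gset_self (g : List (List Int)) (i j : Nat) (v : Int)
    (hi : i < g.length) (hj : j < (g.getD i []).length) :
    gval (gset g i j v) i j = v := by
  unfold gval
  rw [getD_gset_self g i j v hi]
  rw [List.getD_eq_getElem?_getD, List.getElem?_set_self (by simpa using hj)]
  rfl

theorem val_gset_or (g : List (List Int)) (i j : Nat) (v : Int) (a b : Nat) :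
    gval (gset g i j v) a b = gval g a b ∨ gval (gset g i j v) a b = v := by
  by_cases h : a = i ∧ b = j
  · obtain ⟨rfl, rfl⟩ := h
    by_cases hi : a < g.length
    · by_cases hj : b < (g.getD a []).length
      · exact Or.inr (val_gset_self g a b v hi hj)
      · left
        unfold gval
        rw [getD_gset_self g a b v hi, List.set_eq_of_length_le (Nat.le_of_not_lt hj)]
    · left
      rw [gset_of_length_le g a b v (by omega)]
  · exact Or.inl (val_gset_ne g i j v a b h)

theorem goodShape_gset (g : List (List Int)) (i j : Nat) (v : Int) (h : GoodShape g) :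
    GoodShape (gset g i j v) := by
  intro a ha
  rw [length_gset] at ha
  rw [rowlen_gset, rowlen_gset]
  exact h a ha


theorem scan_foldl_mono (g g' : List (List Int))
    (hlen : g'.length = g.length) (hm : (g'.getD 0 []).length = (g.getD 0 []).length)
    (H0 : ∀ a b, gval g' a b = 0 → gval g a b = 0)
    (H23 : ∀ a b, gval g a b = 2 ∨ gval g a b = 3 → gval g' a b = 2 ∨ gval g' a b = 3)
    (ks : List (Int × Int)) :
    ∀ (acc acc' : Nat × Bool), acc'.1 ≤ acc.1 → (acc.2 = true → acc'.2 = true) →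
    (ks.foldl (scanStep g') acc').1 ≤ (ks.foldl (scanStep g) acc).1 ∧
      ((ks.foldl (scanStep g) acc).2 = true → (ks.foldl (scanStep g') acc').2 = true) := by
  induction ks with
  | nil => intro acc acc' h1 h2; exact ⟨h1, h2⟩
  | cons k ks ih =>
    intro acc acc' h1 h2
    simp only [List.foldl_cons]
    have hstep : (scanStep g' acc' k).1 ≤ (scanStep g acc k).1 ∧
        ((scanStep g acc k).2 = true → (scanStep g' acc' k).2 = true) := by
      unfold scanStep
      rw [hlen, hm]
      by_cases hguard : 0 ≤ k.1 ∧ k.1 < (g.length : Int) ∧ 0 ≤ k.2 ∧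
          k.2 < ((g.getD 0 []).length : Int)
      · rw [if_pos hguard, if_pos hguard]
        constructor
        · by_cases h0' : gval g' k.1.toNat k.2.toNat = 0
          · rw [if_pos h0', if_pos (H0 _ _ h0')]; simpa using h1
          · rw [if_neg h0']
            by_cases h0g : gval g k.1.toNat k.2.toNat = 0
            · rw [if_pos h0g]; simp; omega
            · rw [if_neg h0g]; simpa using h1
        · intro hb
          simp only [Bool.or_eq_true, decide_eq_true_eq] at hb ⊢
          rcases hb with hb | hb
          · exact Or.inl (h2 hb)
          · exact Or.inr (H23 _ _ hb)
      · rw [if_neg hguard, if_neg hguard]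
        exact ⟨h1, h2⟩
    exact ih _ _ hstep.1 hstep.2

theorem scan_mono (g g' : List (List Int))
    (hlen : g'.length = g.length) (hm : (g'.getD 0 []).length = (g.getD 0 []).length)
    (H0 : ∀ a b, gval g' a b = 0 → gval g a b = 0)
    (H23 : ∀ a b, gval g a b = 2 ∨ gval g a b = 3 → gval g' a b = 2 ∨ gval g' a b = 3)
    (i j : Nat) :
    (scanNbrs g' i j).1 ≤ (scanNbrs g i j).1 ∧
      ((scanNbrs g i j).2 = true → (scanNbrs g' i j).2 = true) :=
  scan_foldl_mono g g' hlen hm H0 H23 (nbrList i j) (0, false) (0, false) le_rfl (fun h => h)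

theorem scan_congr (g g' : List (List Int))
    (hlen : g'.length = g.length) (hm : (g'.getD 0 []).length = (g.getD 0 []).length)
    (i j : Nat)
    (Hval : ∀ k ∈ nbrList i j,
      0 ≤ k.1 → k.1 < (g.length : Int) → 0 ≤ k.2 → k.2 < ((g.getD 0 []).length : Int) →
      gval g' k.1.toNat k.2.toNat = gval g k.1.toNat k.2.toNat) :
    scanNbrs g' i j = scanNbrs g i j := by
  unfold scanNbrs
  have : ∀ (ks : List (Int × Int)), (∀ k ∈ ks,
      0 ≤ k.1 → k.1 < (g.length : Int) → 0 ≤ k.2 → k.2 < ((g.getD 0 []).length : Int) →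
      gval g' k.1.toNat k.2.toNat = gval g k.1.toNat k.2.toNat) →
      ∀ acc, ks.foldl (scanStep g') acc = ks.foldl (scanStep g) acc := by
    intro ks
    induction ks with
    | nil => intro _ acc; rfl
    | cons k ks ih =>
      intro h acc
      simp only [List.foldl_cons]
      rw [show scanStep g' acc k = scanStep g acc k by
        unfold scanStep
        rw [hlen, hm]
        by_cases hguard : 0 ≤ k.1 ∧ k.1 < (g.length : Int) ∧ 0 ≤ k.2 ∧
            k.2 < ((g.getD 0 []).length : Int)
        · rw [if_pos hguard, if_pos hguard,
            h k List.mem_cons_self hguard.1 hguard.2.1 hguard.2.2.1 hguard.2.2.2]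
        · rw [if_neg hguard, if_neg hguard]]
      exact ih (fun k hk => h k (List.mem_cons_of_mem _ hk)) _
  exact this _ Hval _

-- converting one convertible cell preserves convertibility of every other cell
theorem conv_of_step (g : List (List Int)) (p q a b : Nat)
    (hpq : Conv g p q) (hab : Conv g a b) (hne : ¬(a = p ∧ b = q)) :
    Conv (gset g p q 3) a b := by
  obtain ⟨hp, hq, hc1, hc2, hc3⟩ := hpq
  obtain ⟨ha, hb, hd1, hd2, hd3⟩ := hab
  have hlen := length_gset g p q 3
  have hm := m_gset g p q 3
  have H0 : ∀ x y, gval (gset g p q 3) x y = 0 → gval g x y = 0 := by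
    intro x y hxy
    rcases val_gset_or g p q 3 x y with h | h
    · omega
    · omega
  have H23 : ∀ x y, gval g x y = 2 ∨ gval g x y = 3 →
      gval (gset g p q 3) x y = 2 ∨ gval (gset g p q 3) x y = 3 := by
    intro x y hxy
    by_cases hc : x = p ∧ y = q
    · obtain ⟨rfl, rfl⟩ := hc
      exact absurd (by tauto) hc2
    · rw [val_gset_ne g p q 3 x y hc]; exact hxy
  have hmono := scan_mono g (gset g p q 3) hlen hm H0 H23 a b
  refine ⟨by omega, by omega, le_trans hmono.1 hd1, ?_, hmono.2 hd3⟩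
  rw [val_gset_ne g p q 3 a b hne]
  exact hd2


theorem mem_cells (n m : Nat) (ij : Nat × Nat) : ij ∈ cells n m ↔ ij.1 < n ∧ ij.2 < m := by
  obtain ⟨i, j⟩ := ij
  simp [cells, List.mem_flatMap]

theorem cells_length (n m : Nat) : (cells n m).length = n * m := by
  simp [cells, List.length_flatMap]

theorem countP_strict {α : Type} (p q : α → Bool) (l : List α)
    (h : ∀ x ∈ l, q x = true → p x = true) (x : α) (hx : x ∈ l)
    (hp : p x = true) (hq : ¬ q x = true) :
    l.countP q < l.countP p := by
  induction l with
  | nil => cases hx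
  | cons y l ih =>
    rw [List.countP_cons, List.countP_cons]
    rcases List.mem_cons.1 hx with rfl | hx'
    · have hle : l.countP q ≤ l.countP p :=
        List.countP_mono_left (fun a ha => h a (List.mem_cons_of_mem _ ha))
      have hqy : q x = false := by simpa using hq
      simp [hp, hqy]
      omega
    · have hstep := ih (fun a ha => h a (List.mem_cons_of_mem _ ha)) hx'
      by_cases hqy : q y = true
      · have hpy := h y List.mem_cons_self hqy
        simp [hqy, hpy]; omega
      · by_cases hpy : p y = true <;> simp [hqy, hpy] <;> omega

theorem step_Mnot3 (g : List (List Int)) (i j : Nat) (hg : GoodShape g) (h : Conv g i j) :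
    Mnot3 (gset g i j 3) < Mnot3 g := by
  obtain ⟨hi, hj, _, hv, _⟩ := h
  unfold Mnot3
  rw [length_gset, m_gset]
  apply countP_strict _ _ _ ?hh (i, j) ((mem_cells _ _ _).2 ⟨hi, hj⟩) ?hp ?hq
  case hh =>
    intro x _ hx
    rcases val_gset_or g i j 3 x.1 x.2 with hcase | hcase
    · rw [← hcase]; exact hx
    · rw [hcase] at hx; simp at hx
  case hp =>
    show (gval g i j != 3) = true
    simp only [bne_iff_ne, ne_eq]
    intro hc
    exact hv (Or.inr (Or.inr hc))
  case hq =>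
    have hj' : j < (g.getD i []).length := lt_of_lt_of_le hj (hg i hi)
    show ¬ (gval (gset g i j 3) i j != 3) = true
    rw [val_gset_self g i j 3 hi hj']
    simp

theorem step_good (g g' : List (List Int)) (h : Step g g') (hg : GoodShape g) : GoodShape g' := by
  obtain ⟨i, j, _, rfl⟩ := h
  exact goodShape_gset g i j 3 hg

theorem reach_good (g g' : List (List Int)) (h : Reach g g') (hg : GoodShape g) : GoodShape g' := by
  induction h with
  | refl => exact hg
  | tail hstep hlast ih => exact step_good _ _ hlast ih

-- conversions at distinct cells commute
theorem gset_comm (g : List (List Int)) (i j p q : Nat) (v : Int)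
    (hne : ¬(i = p ∧ j = q)) (hi : i < g.length) (hj : j < (g.getD i []).length)
    (hp : p < g.length) (hq : q < (g.getD p []).length) :
    gset (gset g i j v) p q v = gset (gset g p q v) i j v := by
  by_cases hip : i = p
  · subst hip
    have hjq : j ≠ q := fun h => hne ⟨rfl, h⟩
    have e1 : gset (gset g i j v) i q v =
        g.set i (((g.getD i []).set j v).set q v) := by
      show (gset g i j v).set i (((gset g i j v).getD i []).set q v) = _
      rw [getD_gset_self g i j v hi]
      show (g.set i ((g.getD i []).set j v)).set i _ = _
      rw [List.set_set]
    have e2 : gset (gset g i q v) i j v =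
        g.set i (((g.getD i []).set q v).set j v) := by
      show (gset g i q v).set i (((gset g i q v).getD i []).set j v) = _
      rw [getD_gset_self g i q v hi]
      show (g.set i ((g.getD i []).set q v)).set i _ = _
      rw [List.set_set]
    rw [e1, e2, List.set_comm v v hjq]
  · have e1 : gset (gset g i j v) p q v =
        (g.set i ((g.getD i []).set j v)).set p ((g.getD p []).set q v) := by
      conv_lhs => rw [show gset (gset g i j v) p q v =
        (gset g i j v).set p (((gset g i j v).getD p []).set q v) from rfl]
      rw [getD_gset_ne g i j v p (Ne.symm hip)]
      rfl
    have e2 : gset (gset g p q v) i j v =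
        (g.set p ((g.getD p []).set q v)).set i ((g.getD i []).set j v) := by
      conv_lhs => rw [show gset (gset g p q v) i j v =
        (gset g p q v).set i (((gset g p q v).getD i []).set j v) from rfl]
      rw [getD_gset_ne g p q v i hip]
      rfl
    rw [e1, e2, List.set_comm _ _ hip]

-- pull lemma: a convertible cell may be converted first on the way to any final state
theorem reach_pull (gf : List (List Int)) (hf : Final gf) :
    ∀ g, Reach g gf → GoodShape g → ∀ i j, Conv g i j → Reach (gset g i j 3) gf := by
  intro g h
  induction h using Relation.ReflTransGen.head_induction_on with
  | refl => intro hg i j hc; exact absurd hc (hf i j)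
  | head hstep hreach ih =>
    rename_i a c
    intro hg i j hc
    obtain ⟨p, q, hcpq, hceq⟩ := hstep
    subst hceq
    by_cases hij : i = p ∧ j = q
    · obtain ⟨rfl, rfl⟩ := hij; exact hreach
    · have hc' := conv_of_step a p q i j hcpq hc hij
      have hg' := goodShape_gset a p q 3 hg
      have ih' := ih hg' i j hc'
      have hpq' := conv_of_step a i j p q hc hcpq (fun hh => hij ⟨hh.1.symm, hh.2.symm⟩)
      have hcomm := gset_comm a i j p q 3 hij hc.1 (lt_of_lt_of_le hc.2.1 (hg i hc.1))
        hcpq.1 (lt_of_lt_of_le hcpq.2.1 (hg p hcpq.1))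
      exact Relation.ReflTransGen.head ⟨p, q, hpq', rfl⟩ (hcomm ▸ ih')

theorem reach_unique (g1 g2 : List (List Int)) (hf1 : Final g1) (hf2 : Final g2) :
    ∀ g, Reach g g1 → GoodShape g → Reach g g2 → g1 = g2 := by
  intro g h1
  induction h1 using Relation.ReflTransGen.head_induction_on with
  | refl =>
    intro _ h2
    rcases Relation.ReflTransGen.cases_head h2 with rfl | ⟨c, hstep, _⟩
    · rfl
    · obtain ⟨i, j, hc, _⟩ := hstep
      exact absurd hc (hf1 i j)
  | head hstep hreach ih =>
    intro hg h2
    obtain ⟨p, q, hc, rfl⟩ := hstep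
    exact ih (goodShape_gset _ _ _ _ hg) (reach_pull g2 hf2 _ h2 hg p q hc)

-- ===== port A: the sweep reaches a final state =====
theorem passCell_eq (g : List (List Int)) (b : Bool) (ij : Nat × Nat) :
    passCell (g, b) ij =
      if convCond g ij.1 ij.2 then (gset g ij.1 ij.2 3, true) else (g, b) := by
  simp only [passCell, convCond]
  split_ifs <;> first | rfl | tauto

theorem pass_flag (cellsL : List (Nat × Nat)) :
    ∀ s : List (List Int) × Bool, s.2 = true → (cellsL.foldl passCell s).2 = true := by
  induction cellsL with
  | nil => intro s h; exact h
  | cons c L ih =>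
    intro s h
    rw [List.foldl_cons]
    apply ih
    obtain ⟨g, b⟩ := s
    rw [passCell_eq]
    split_ifs <;> simp_all

theorem pass_reach (cellsL : List (Nat × Nat)) :
    ∀ (g : List (List Int)) (b : Bool),
    (∀ ij ∈ cellsL, ij.1 < g.length ∧ ij.2 < (g.getD 0 []).length) →
    Reach g (cellsL.foldl passCell (g, b)).1 := by
  induction cellsL with
  | nil => intro g b _; exact Relation.ReflTransGen.refl
  | cons c L ih =>
    intro g b hr
    rw [List.foldl_cons, passCell_eq]
    by_cases hc : convCond g c.1 c.2
    · rw [if_pos hc]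
      have hcv : Conv g c.1 c.2 :=
        ⟨(hr c List.mem_cons_self).1, (hr c List.mem_cons_self).2, hc⟩
      refine Relation.ReflTransGen.head ⟨c.1, c.2, hcv, rfl⟩ (ih _ true ?_)
      intro ij hij
      rw [length_gset, m_gset]
      exact hr ij (List.mem_cons_of_mem _ hij)
    · rw [if_neg hc]
      exact ih g b (fun ij hij => hr ij (List.mem_cons_of_mem _ hij))

theorem pass_nochange (cellsL : List (Nat × Nat)) :
    ∀ g : List (List Int),
    (cellsL.foldl passCell (g, false)).2 = false →
    cellsL.foldl passCell (g, false) = (g, false) ∧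
      ∀ ij ∈ cellsL, ¬ convCond g ij.1 ij.2 := by
  induction cellsL with
  | nil => intro g _; exact ⟨rfl, fun ij h => absurd h (List.not_mem_nil)⟩
  | cons c L ih =>
    intro g hfl
    rw [List.foldl_cons, passCell_eq] at hfl ⊢
    by_cases hc : convCond g c.1 c.2
    · rw [if_pos hc] at hfl
      rw [pass_flag L _ rfl] at hfl
      cases hfl
    · rw [if_neg hc] at hfl ⊢
      obtain ⟨he, hall⟩ := ih g hfl
      refine ⟨he, ?_⟩
      intro ij hij
      rcases List.mem_cons.1 hij with rfl | hij'
      · exact hc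
      · exact hall ij hij'

theorem pass_M (cellsL : List (Nat × Nat)) :
    ∀ (g : List (List Int)) (b : Bool),
    (∀ ij ∈ cellsL, ij.1 < g.length ∧ ij.2 < (g.getD 0 []).length) → GoodShape g →
    Mnot3 (cellsL.foldl passCell (g, b)).1 ≤ Mnot3 g ∧
    (b = false → (cellsL.foldl passCell (g, b)).2 = true →
      Mnot3 (cellsL.foldl passCell (g, b)).1 < Mnot3 g) := by
  induction cellsL with
  | nil =>
    intro g b _ _
    exact ⟨le_rfl, fun h1 h2 => by rw [h1] at h2; cases h2⟩
  | cons c L ih =>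
    intro g b hr hg
    rw [List.foldl_cons, passCell_eq]
    by_cases hc : convCond g c.1 c.2
    · rw [if_pos hc]
      have hcv : Conv g c.1 c.2 :=
        ⟨(hr c List.mem_cons_self).1, (hr c List.mem_cons_self).2, hc⟩
      have hM : Mnot3 (gset g c.1 c.2 3) < Mnot3 g := step_Mnot3 g c.1 c.2 hg hcv
      have hr' : ∀ ij ∈ L, ij.1 < (gset g c.1 c.2 3).length ∧
          ij.2 < ((gset g c.1 c.2 3).getD 0 []).length := by
        intro ij hij
        rw [length_gset, m_gset]
        exact hr ij (List.mem_cons_of_mem _ hij)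
      have := (ih (gset g c.1 c.2 3) true hr' (goodShape_gset g c.1 c.2 3 hg)).1
      exact ⟨le_of_lt (lt_of_le_of_lt this hM), fun _ _ => lt_of_le_of_lt this hM⟩
    · rw [if_neg hc]
      exact ih g b (fun ij hij => hr ij (List.mem_cons_of_mem _ hij)) hg

theorem loopA_correct : ∀ (fuel : Nat) (g : List (List Int)), GoodShape g →
    Mnot3 g < fuel → Reach g (loopA fuel g) ∧ Final (loopA fuel g) := by
  intro fuel
  induction fuel with
  | zero => intro g _ h; omega
  | succ f ih =>
    intro g hg hM
    have hr : ∀ ij ∈ cells g.length (g.getD 0 []).length,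
        ij.1 < g.length ∧ ij.2 < (g.getD 0 []).length := by
      intro ij hij; exact (mem_cells _ _ _).1 hij
    simp only [loopA]
    by_cases hfl : ((cells g.length (g.getD 0 []).length).foldl passCell (g, false)).2 = true
    · rw [if_pos hfl]
      have hreach := pass_reach _ g false hr
      have hM' := (pass_M _ g false hr hg).2 rfl hfl
      have hg' := reach_good _ _ hreach hg
      obtain ⟨h1, h2⟩ := ih _ hg' (by omega)
      exact ⟨Relation.ReflTransGen.trans hreach h1, h2⟩
    · rw [if_neg hfl]
      have hfl' : ((cells g.length (g.getD 0 []).length).foldl passCell (g, false)).2 = false := by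
        simpa using hfl
      obtain ⟨he, hall⟩ := pass_nochange _ g hfl'
      rw [he]
      refine ⟨Relation.ReflTransGen.refl, ?_⟩
      intro i j hc
      exact hall (i, j) ((mem_cells _ _ _).2 ⟨hc.1, hc.2.1⟩) hc.2.2

-- ===== port B: the worklist reaches a final state =====
theorem pushNbrs_range (n m i j : Nat) :
    ∀ ab ∈ pushNbrs n m i j, ab.1 < n ∧ ab.2 < m := by
  intro ab hab
  simp only [pushNbrs, List.mem_filterMap] at hab
  obtain ⟨k, _, hk⟩ := hab
  split_ifs at hk with hguard
  cases hk
  constructor <;> omega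

theorem pushNbrs_symm (n m i j a b : Nat) (ha : a < n) (hb : b < m)
    (hadj : ((i : Int), (j : Int)) ∈ nbrList a b) : (a, b) ∈ pushNbrs n m i j := by
  simp only [nbrList, List.mem_cons, Prod.mk.injEq, List.not_mem_nil, or_false] at hadj
  simp only [pushNbrs, List.mem_filterMap, nbrList, List.mem_cons,
    List.not_mem_nil, or_false]
  rcases hadj with ⟨h1, h2⟩ | ⟨h1, h2⟩ | ⟨h1, h2⟩ | ⟨h1, h2⟩
  · refine ⟨((i : Int) + 1, (j : Int)), Or.inr (Or.inl rfl), ?_⟩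
    rw [if_pos ⟨by omega, by omega, by omega, by omega⟩]
    simp only [Option.some.injEq, Prod.mk.injEq]
    constructor <;> omega
  · refine ⟨((i : Int) - 1, (j : Int)), Or.inl rfl, ?_⟩
    rw [if_pos ⟨by omega, by omega, by omega, by omega⟩]
    simp only [Option.some.injEq, Prod.mk.injEq]
    constructor <;> omega
  · refine ⟨((i : Int), (j : Int) + 1), Or.inr (Or.inr (Or.inr rfl)), ?_⟩
    rw [if_pos ⟨by omega, by omega, by omega, by omega⟩]
    simp only [Option.some.injEq, Prod.mk.injEq]
    constructor <;> omega
  · refine ⟨((i : Int), (j : Int) - 1), Or.inr (Or.inr (Or.inl rfl)), ?_⟩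
    rw [if_pos ⟨by omega, by omega, by omega, by omega⟩]
    simp only [Option.some.injEq, Prod.mk.injEq]
    constructor <;> omega

theorem loopB_correct : ∀ (fuel : Nat) (g : List (List Int)) (st : List (Nat × Nat)),
    GoodShape g →
    (∀ ij ∈ st, ij.1 < g.length ∧ ij.2 < (g.getD 0 []).length) →
    (∀ i j, Conv g i j → (i, j) ∈ st) →
    5 * Mnot3 g + st.length < fuel →
    Reach g (loopB fuel g st) ∧ Final (loopB fuel g st) := by
  intro fuel
  induction fuel with
  | zero => intro g st _ _ _ h; omega
  | succ f ih =>
    intro g st hg hst hconv hfuel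
    match st with
    | [] =>
      simp only [loopB]
      exact ⟨Relation.ReflTransGen.refl, fun i j hc => by cases hconv i j hc⟩
    | ij :: rest =>
      simp only [loopB]
      by_cases hv : gval g ij.1 ij.2 = 1 ∨ gval g ij.1 ij.2 = 2 ∨ gval g ij.1 ij.2 = 3
      · rw [if_pos hv]
        apply ih g rest hg (fun c hc => hst c (List.mem_cons_of_mem _ hc))
        · intro a b hc
          rcases List.mem_cons.1 (hconv a b hc) with heq | hmem
          · exfalso; subst heq; exact hc.2.2.2.1 hv
          · exact hmem
        · simp only [List.length_cons] at hfuel; omega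
      · rw [if_neg hv]
        by_cases hcp : (scanNbrs g ij.1 ij.2).1 ≤ 1 ∧ (scanNbrs g ij.1 ij.2).2 = true
        · rw [if_pos hcp]
          have hrange := hst ij List.mem_cons_self
          have hC : Conv g ij.1 ij.2 := ⟨hrange.1, hrange.2, hcp.1, hv, hcp.2⟩
          have hg' : GoodShape (gset g ij.1 ij.2 3) := goodShape_gset _ _ _ _ hg
          have hlen := length_gset g ij.1 ij.2 3
          have hm := m_gset g ij.1 ij.2 3
          have hM : Mnot3 (gset g ij.1 ij.2 3) < Mnot3 g := step_Mnot3 g ij.1 ij.2 hg hC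
          have hpushlen : (pushNbrs g.length ((g.getD 0 []).length) ij.1 ij.2).length ≤ 4 := by
            have := List.length_filterMap_le (fun k =>
              if 0 ≤ k.1 ∧ k.1 < ((g.length : Nat) : Int) ∧ 0 ≤ k.2 ∧
                  k.2 < ((((g.getD 0 []).length : Nat)) : Int) then
                some (k.1.toNat, k.2.toNat) else none) (nbrList ij.1 ij.2)
            simpa [pushNbrs, nbrList] using this
          obtain ⟨h1, h2⟩ := ih (gset g ij.1 ij.2 3)
            ((pushNbrs g.length ((g.getD 0 []).length) ij.1 ij.2).reverse ++ rest)
            hg'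
            (by
              intro c hc
              rw [hlen, hm]
              rcases List.mem_append.1 hc with hcl | hcr
              · exact pushNbrs_range _ _ _ _ c (List.mem_reverse.1 hcl)
              · exact hst c (List.mem_cons_of_mem _ hcr))
            (by
              intro a b hc
              by_cases hab : a = ij.1 ∧ b = ij.2
              · exfalso
                apply hc.2.2.2.1
                right; right
                rw [hab.1, hab.2]
                exact val_gset_self g ij.1 ij.2 3 hrange.1
                  (lt_of_lt_of_le hrange.2 (hg ij.1 hrange.1))
              · by_cases hadj : ((ij.1 : Int), (ij.2 : Int)) ∈ nbrList a b
                · apply List.mem_append_left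
                  rw [List.mem_reverse]
                  apply pushNbrs_symm
                  · rw [← hlen]; exact hc.1
                  · rw [← hm]; exact hc.2.1
                  · exact hadj
                · have hcg : Conv g a b := by
                    have hscan : scanNbrs (gset g ij.1 ij.2 3) a b = scanNbrs g a b := by
                      apply scan_congr g _ hlen hm
                      intro k hk hk1 hk2 hk3 hk4
                      apply val_gset_ne
                      intro ⟨he1, he2⟩
                      apply hadj
                      have : k = ((ij.1 : Int), (ij.2 : Int)) := by
                        obtain ⟨k1, k2⟩ := k
                        simp only at he1 he2 hk1 hk2 hk3 hk4
                        have : k1 = (ij.1 : Int) := by omega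
                        have : k2 = (ij.2 : Int) := by omega
                        simp_all
                      rw [← this]; exact hk
                    refine ⟨by rw [← hlen]; exact hc.1, by rw [← hm]; exact hc.2.1, ?_, ?_, ?_⟩
                    · rw [← hscan]; exact hc.2.2.1
                    · rw [← val_gset_ne g ij.1 ij.2 3 a b hab]; exact hc.2.2.2.1
                    · rw [← hscan]; exact hc.2.2.2.2
                  rcases List.mem_cons.1 (hconv a b hcg) with heq | hmem
                  · exfalso; apply hab
                    constructor
                    · exact (congrArg Prod.fst heq)
                    · exact (congrArg Prod.snd heq)
                  · exact List.mem_append_right _ hmem)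
            (by
              rw [List.length_append, List.length_reverse]
              simp only [List.length_cons] at hfuel
              omega)
          exact ⟨Relation.ReflTransGen.head ⟨ij.1, ij.2, hC, rfl⟩ h1, h2⟩
        · rw [if_neg hcp]
          apply ih g rest hg (fun c hc => hst c (List.mem_cons_of_mem _ hc))
          · intro a b hc
            rcases List.mem_cons.1 (hconv a b hc) with heq | hmem
            · exfalso
              subst heq
              exact hcp ⟨hc.2.2.1, hc.2.2.2.2⟩
            · exact hmem
          · simp only [List.length_cons] at hfuel; omega

-- ===== VERDICT (by name: the statement is the Claim_ definition above) =====
theorem slow_var_spec : Claim_equal_slow_var := by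
  unfold Claim_equal_slow_var Spec_slow_var
  intro g _ hpre
  have hg : GoodShape g := by
    intro i hi
    apply hpre
    rw [List.getD_eq_getElem?_getD, List.getElem?_eq_getElem hi]
    exact List.getElem_mem hi
  have hMbound : Mnot3 g ≤ g.length * (g.getD 0 []).length := by
    unfold Mnot3
    calc ((cells g.length (g.getD 0 []).length).countP _)
        ≤ (cells g.length (g.getD 0 []).length).length := List.countP_le_length
      _ = g.length * (g.getD 0 []).length := cells_length _ _
  have hA := loopA_correct (g.length * (g.getD 0 []).length + 1) g hg (by omega)
  have hB := loopB_correct (6 * (g.length * (g.getD 0 []).length) + 1) g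
      ((cells g.length (g.getD 0 []).length).reverse) hg
      (by intro ij hij; exact (mem_cells _ _ _).1 (List.mem_reverse.1 hij))
      (by intro i j hc; rw [List.mem_reverse]; exact (mem_cells _ _ _).2 ⟨hc.1, hc.2.1⟩)
      (by rw [List.length_reverse, cells_length]; omega)
  show loopA _ g = slow_var_alt g
  exact reach_unique _ _ hA.2 hB.2 g hA.1 hg hB.1
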